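-- pv_equiv track=rewrite | github.com/DTUAqua-ObsTek/mosaic-library | src/mosaicking/core.py | group_sequences_length_threshold
-- ===== SOURCE A (Python) =====
-- from typing import Sequence, Union, Any
--
-- def group_sequences_length_threshold(sequences: Sequence[Sequence[Any]], length: int) -> tuple[tuple[Sequence[Any], ...], ...]:
--     result = []
--     current_group = []
--
--     for s in sequences:
--         if len(s) >= length:
--             current_group.append(s)
--         else:
--             if current_group:
--                 result.append(tuple(current_group))
--                 current_group = []
--
--     # Add the last group if it exists
--     if current_group:
--         result.append(tuple(current_group))
--
--     return tuple(result)
-- ===== SOURCE B (Python) =====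
-- from itertools import groupby
--
-- def group_sequences_length_threshold(sequences, length):
--     return tuple(tuple(g) for k, g in groupby(sequences, key=lambda s: len(s) >= length) if k)
-- ===== Notes on version B (the rewrite author's own statement) =====
-- stated objective: idiomatic
-- what changed: Replaces the manual current_group accumulator with end-of-loop flush by itertools.groupby run-detection keyed on len(s) >= length, keeping only the True runs.
import Mathlib
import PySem

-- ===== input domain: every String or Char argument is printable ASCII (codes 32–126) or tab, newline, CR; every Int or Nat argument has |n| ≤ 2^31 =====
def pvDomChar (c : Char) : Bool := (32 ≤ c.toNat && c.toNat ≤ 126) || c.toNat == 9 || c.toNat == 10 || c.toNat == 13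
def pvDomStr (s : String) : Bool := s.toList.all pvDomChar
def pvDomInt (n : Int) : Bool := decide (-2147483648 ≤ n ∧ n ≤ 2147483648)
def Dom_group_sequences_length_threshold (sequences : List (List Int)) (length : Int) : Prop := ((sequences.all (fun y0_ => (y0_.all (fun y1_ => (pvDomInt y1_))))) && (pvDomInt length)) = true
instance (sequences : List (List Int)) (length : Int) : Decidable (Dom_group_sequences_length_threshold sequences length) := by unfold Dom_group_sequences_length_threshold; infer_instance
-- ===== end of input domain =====

-- B replaces A's manual current_group accumulator + final flush by groupby-style run detection
-- keyed on len(s) >= length, keeping the True runs (idiomatic decomposition; same cost).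

-- ===== PORT A =====
-- literal port of A: one fold over the sequences carrying (result, current_group), then flush
def group_sequences_length_threshold (sequences : List (List Int)) (length : Int) : List (List (List Int)) :=
  let st := sequences.foldl
    (fun (st : List (List (List Int)) × List (List Int)) s =>
      if (s.length : Int) ≥ length then (st.1, st.2 ++ [s])
      else if st.2 ≠ [] then (st.1 ++ [st.2], []) else st)
    ([], [])
  if st.2 ≠ [] then st.1 ++ [st.2] else st.1

-- ===== PORT B =====
-- itertools.groupby: split the list into maximal runs of equal key, tagging each run with its key
def pyGroupBy (key : List Int → Bool) : List (List Int) → List (Bool × List (List Int))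
  | [] => []
  | x :: xs =>
    let k := key x
    (k, x :: xs.takeWhile (fun y => key y == k)) ::
      pyGroupBy key (xs.dropWhile (fun y => key y == k))
termination_by l => l.length
decreasing_by
  simp only [List.length_cons]
  exact Nat.lt_succ_of_le (List.length_dropWhile_le _ _)

-- port of B: groupby on the key len(s) >= length, keep groups whose key is True
def group_sequences_length_threshold_alt (sequences : List (List Int)) (length : Int) : List (List (List Int)) :=
  (pyGroupBy (fun s => (s.length : Int) ≥ length) sequences).filterMap
    (fun kg => if kg.1 then some kg.2 else none)

-- ===== PRECONDITION & SPEC =====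
def Spec_group_sequences_length_threshold (sequences : List (List Int)) (length : Int) (out : List (List (List Int))) : Prop := out = group_sequences_length_threshold_alt sequences length
instance (sequences : List (List Int)) (length : Int) (out : List (List (List Int))) : Decidable (Spec_group_sequences_length_threshold sequences length out) := by unfold Spec_group_sequences_length_threshold; infer_instance

-- ===== CLAIM (what is proved, stated in full; the proofs are below) =====
def Claim_equal_group_sequences_length_threshold : Prop := ∀ (sequences : List (List Int)) (length : Int), Dom_group_sequences_length_threshold sequences length → Spec_group_sequences_length_threshold sequences length (group_sequences_length_threshold sequences length)

-- ===== LEMMAS AND PROOFS =====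

-- recursive reading of A's fold-plus-flush (proof helper)
def glue (pass : List Int → Bool) (cur : List (List Int)) : List (List Int) → List (List (List Int))
  | [] => if cur = [] then [] else [cur]
  | s :: xs =>
    if pass s then glue pass (cur ++ [s]) xs
    else (if cur = [] then [] else [cur]) ++ glue pass [] xs

-- B's result as a function of the key
def altOf (pass : List Int → Bool) (xs : List (List Int)) : List (List (List Int)) :=
  (pyGroupBy pass xs).filterMap (fun kg => if kg.1 then some kg.2 else none)

theorem altOf_cons_true (pass : List Int → Bool) (x : List Int) (xs : List (List Int))
    (h : pass x = true) :
    altOf pass (x :: xs) = (x :: xs.takeWhile pass) :: altOf pass (xs.dropWhile pass) := by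
  have hk : (fun y => pass y == pass x) = pass := by
    funext y; simp [h]
  simp only [altOf, pyGroupBy, hk]
  simp [h]

theorem altOf_cons_false (pass : List Int → Bool) (x : List Int) (xs : List (List Int))
    (h : pass x = false) :
    altOf pass (x :: xs) = altOf pass (xs.dropWhile (fun y => !pass y)) := by
  have hk : (fun y => pass y == pass x) = (fun y => !pass y) := by
    funext y; simp [h]
  simp only [altOf, pyGroupBy, hk]
  simp [h]

-- a failing prefix contributes nothing to B's result
theorem altOf_dropFail (pass : List Int → Bool) (xs : List (List Int)) :
    altOf pass (xs.dropWhile (fun y => !pass y)) = altOf pass xs := by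
  induction xs with
  | nil => simp [List.dropWhile]
  | cons x xs ih =>
    by_cases h : pass x = true
    · simp [List.dropWhile, h]
    · have h' : pass x = false := by simpa using h
      rw [altOf_cons_false pass x xs h']
      simp [List.dropWhile, h']

-- main invariant: glue with accumulator cur equals B's result, with cur welded onto the next run
theorem glue_eq (pass : List Int → Bool) (xs : List (List Int)) : ∀ cur : List (List Int),
    glue pass cur xs =
      if cur = [] then altOf pass xs
      else (cur ++ xs.takeWhile pass) :: altOf pass (xs.dropWhile pass) := by
  induction xs with
  | nil =>
    intro cur
    by_cases hc : cur = [] <;> simp [glue, hc, altOf, pyGroupBy]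
  | cons x xs ih =>
    intro cur
    by_cases h : pass x = true
    · have hne : cur ++ [x] ≠ [] := by simp
      rw [show glue pass cur (x :: xs) = glue pass (cur ++ [x]) xs from by simp [glue, h],
          ih (cur ++ [x]), if_neg hne]
      by_cases hc : cur = []
      · subst hc
        rw [if_pos rfl, altOf_cons_true pass x xs h]
        simp
      · rw [if_neg hc, List.takeWhile_cons_of_pos h, List.dropWhile_cons_of_pos h]
        simp
    · have h' : pass x = false := by simpa using h
      rw [show glue pass cur (x :: xs) = (if cur = [] then [] else [cur]) ++ glue pass [] xs from by
            simp [glue, h'],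
          ih []]
      rw [if_pos rfl]
      by_cases hc : cur = []
      · subst hc
        rw [if_pos rfl, altOf_cons_false pass x xs h', altOf_dropFail]
        simp
      · rw [if_neg hc, List.takeWhile_cons_of_neg (by simp [h']),
            List.dropWhile_cons_of_neg (by simp [h']),
            altOf_cons_false pass x xs h', altOf_dropFail]
        simp [hc]

-- A's fold with the final flush equals glue
theorem foldA_eq (pass : List Int → Bool) (xs : List (List Int)) :
    ∀ (res : List (List (List Int))) (cur : List (List Int)),
    (let st := xs.foldl
        (fun (st : List (List (List Int)) × List (List Int)) s =>
          if pass s then (st.1, st.2 ++ [s])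
          else if st.2 ≠ [] then (st.1 ++ [st.2], []) else st)
        (res, cur)
     if st.2 ≠ [] then st.1 ++ [st.2] else st.1) = res ++ glue pass cur xs := by
  induction xs with
  | nil =>
    intro res cur
    by_cases hc : cur = [] <;> simp [glue, hc]
  | cons x xs ih =>
    intro res cur
    by_cases h : pass x = true
    · simpa [List.foldl_cons, h, glue] using ih res (cur ++ [x])
    · have h' : pass x = false := by simpa using h
      by_cases hc : cur = []
      · simpa [List.foldl_cons, h', hc, glue] using ih res []
      · have hstep := ih (res ++ [cur]) []
        simp only [List.foldl_cons, h', Bool.false_eq_true, if_false, ne_eq, hc,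
          not_false_iff, if_true] at hstep ⊢
        rw [hstep]
        simp [glue, h', hc]

-- ===== VERDICT (by name: the statement is the Claim_ definition above) =====
theorem group_sequences_length_threshold_spec : Claim_equal_group_sequences_length_threshold := by
  intro sequences length _
  show group_sequences_length_threshold sequences length = group_sequences_length_threshold_alt sequences length
  have hA := foldA_eq (fun s => decide ((s.length : Int) ≥ length)) sequences [] []
  have hG := glue_eq (fun s => decide ((s.length : Int) ≥ length)) sequences []
  rw [if_pos rfl] at hG
  have halt : group_sequences_length_threshold_alt sequences length
      = altOf (fun s => decide ((s.length : Int) ≥ length)) sequences := rfl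
  rw [halt, ← hG]
  simpa [group_sequences_length_threshold, decide_eq_true_eq] using hA
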